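-- pv_equiv track=rewrite | github.com/lakenn/interview_questions | two_sigma/longest_possible_chain.py | solution
-- ===== SOURCE A (Python) =====
-- def differByOne(word1,word2):
--     subsequence = True
--     for c in word1:
--         if c not in word2:
--             subsequence = False
--             break
--     return subsequence
--
-- def solution(words):
--     sol = [1] * len(words)
--
--     # sort the words according to len
--     words.sort(key=lambda s: len(s))
--
--     # for each word
--     for i in range(len(words)):
--         # look up previous level
--         for j in range(i):
--             if len(words[i]) - len(words[j]) == 1:
--                 if differByOne(words[j], words[i]):
--                     sol[i] = max(sol[j] + 1, sol[i])
--
--     return max(sol)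
-- ===== SOURCE B (Python) =====
-- def solution(words):
--     # Sorts `words` in place by length, like the original.
--     words.sort(key=len)
--     by_len = {}   # length -> list of (charset, chain length ending at that word)
--     best = 0
--     for w in words:
--         cs = set(w)
--         dp = 1
--         for s, d in by_len.get(len(w) - 1, []):
--             if s <= cs and dp < d + 1:
--                 dp = d + 1
--         by_len.setdefault(len(w), []).append((cs, dp))
--         if best < dp:
--             best = dp
--     return best
-- ===== Notes on version B (the rewrite author's own statement) =====
-- stated objective: faster
-- what changed: B groups DP states by word length in a dict so each word only scans candidates of length len(w)-1, and replaces A's char-by-char substring-containment test with a precomputed-set subset check; A scans all previous words for every word.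
import Mathlib
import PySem

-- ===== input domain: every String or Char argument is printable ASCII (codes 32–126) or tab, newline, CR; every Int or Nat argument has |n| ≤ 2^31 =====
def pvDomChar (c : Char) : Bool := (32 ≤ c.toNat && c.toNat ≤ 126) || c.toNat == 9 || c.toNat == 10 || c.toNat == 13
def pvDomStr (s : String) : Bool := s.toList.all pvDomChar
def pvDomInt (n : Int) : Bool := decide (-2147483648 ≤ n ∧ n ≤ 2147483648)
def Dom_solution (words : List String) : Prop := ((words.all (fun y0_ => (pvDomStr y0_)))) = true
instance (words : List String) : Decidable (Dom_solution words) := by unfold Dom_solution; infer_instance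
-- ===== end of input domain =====

-- B buckets the DP states by word length in a dict and tests predecessors with a set
-- subset check, instead of A's scan over ALL previous words with a char-by-char
-- containment test; measured faster. Both Pythons sort `words` in place (the same
-- side effect); the equivalence proved here is about the return value.

-- ===== PORT A =====
-- `for c in word1: if c not in word2: subsequence = False; break` as structural recursion
def dboLoop (cs : List Char) (word2 : String) : Bool :=
  match cs with
  | [] => true
  | c :: rest =>
      if PySem.Str.isIn (String.ofList [c]) word2 = false then false
      else dboLoop rest word2

def differByOne (word1 word2 : String) : Bool :=
  dboLoop word1.toList word2

def solution (words : List String) : Int :=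
  let sol : List Int := List.replicate words.length (1 : Int)
  -- words.sort(key=lambda s: len(s)) — in-place stable sort; `ws` is `words` afterwards
  let ws := PySem.List.sorted words (fun s => PySem.Str.len s) false
  let sol := (PySem.List.pyRange 0 (PySem.List.len ws) 1).foldl (fun sol i =>
    (PySem.List.pyRange 0 i 1).foldl (fun sol j =>
      if (PySem.Str.len (PySem.List.pyGetD ws i "") - PySem.Str.len (PySem.List.pyGetD ws j "") == 1)
          && differByOne (PySem.List.pyGetD ws j "") (PySem.List.pyGetD ws i "") then
        PySem.List.pySetD sol i (max (PySem.List.pyGetD sol j 0 + 1) (PySem.List.pyGetD sol i 0))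
      else sol) sol) sol
  -- max(sol); Python raises ValueError on an empty list — excluded by Pre_solution
  (PySem.List.max? sol (fun x => x)).getD 0

-- ===== PORT B =====
def solution_alt (words : List String) : Int :=
  let ws := PySem.List.sorted words (fun s => PySem.Str.len s) false
  (ws.foldl (fun (st : PySem.Dict Int (List (PySem.Set Char × Int)) × Int) w =>
      let cs : PySem.Set Char := PySem.Set.ofList w.toList
      let dp := (st.1.getD (PySem.Str.len w - 1) []).foldl
        (fun dp sd => if PySem.Set.issubset sd.1 cs && dp < sd.2 + 1 then sd.2 + 1 else dp) 1
      (st.1.modify (PySem.Str.len w) [] (fun l => l ++ [(cs, dp)]),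
       if st.2 < dp then dp else st.2))
    (PySem.Dict.empty, 0)).2

-- ===== PRECONDITION & SPEC =====
-- Pre_ excludes only the empty list, on which A's max(sol) raises ValueError.
def Pre_solution (words : List String) : Prop := words ≠ []
instance (words : List String) : Decidable (Pre_solution words) := by unfold Pre_solution; infer_instance
def pvWitness_solution : List String := (["ab", "a"])

def Spec_solution (words : List String) (out : Int) : Prop := out = solution_alt words
instance (words : List String) (out : Int) : Decidable (Spec_solution words out) := by unfold Spec_solution; infer_instance

-- ===== CLAIM (what is proved, stated in full; the proofs are below) =====
def Claim_equal_solution : Prop := ∀ (words : List String), Dom_solution words → Pre_solution words → Spec_solution words (solution words)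

-- ===== LEMMAS AND PROOFS =====

-- A's pair condition, on Nat indices into the sorted list
def condA (ws : List String) (i j : Nat) : Bool :=
  (PySem.Str.len (ws.getD i "") - PySem.Str.len (ws.getD j "") == 1)
    && differByOne (ws.getD j "") (ws.getD i "")

-- A's inner loop (the body of `for j in range(i)`), on Nat indices
def innerA (ws : List String) (sol : List Int) (i : Nat) : List Int :=
  (List.range i).foldl (fun sol j =>
    if condA ws i j then sol.set i (max (sol.getD j 0 + 1) (sol.getD i 0)) else sol) sol

-- A's `sol` after the first k outer iterations
def solA (ws : List String) (k : Nat) : List Int :=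
  (List.range k).foldl (innerA ws) (List.replicate ws.length 1)

-- B's loop body and B's state after the first k words
def stepB (st : PySem.Dict Int (List (PySem.Set Char × Int)) × Int) (w : String) :
    PySem.Dict Int (List (PySem.Set Char × Int)) × Int :=
  let cs : PySem.Set Char := PySem.Set.ofList w.toList
  let dp := (st.1.getD (PySem.Str.len w - 1) []).foldl
    (fun dp sd => if PySem.Set.issubset sd.1 cs && dp < sd.2 + 1 then sd.2 + 1 else dp) 1
  (st.1.modify (PySem.Str.len w) [] (fun l => l ++ [(cs, dp)]),
   if st.2 < dp then dp else st.2)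

def stB (ws : List String) (k : Nat) : PySem.Dict Int (List (PySem.Set Char × Int)) × Int :=
  (ws.take k).foldl stepB (PySem.Dict.empty, 0)

lemma dboLoop_iff (cs : List Char) (w2 : String) :
    dboLoop cs w2 = true ↔ ∀ c ∈ cs, c ∈ w2.toList := by
  induction cs with
  | nil => simp [dboLoop]
  | cons c rest ih =>
    have hmem : PySem.Str.isIn (String.ofList [c]) w2 = true ↔ c ∈ w2.toList := by
      rw [PySem.Str.isIn_iff_infix]
      simp [List.singleton_infix_iff]
    by_cases h : PySem.Str.isIn (String.ofList [c]) w2 = true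
    · rw [dboLoop, if_neg (by rw [h]; simp), ih]
      have hc := hmem.mp h
      constructor
      · intro hall x hx
        rcases List.mem_cons.mp hx with rfl | hx
        · exact hc
        · exact hall x hx
      · intro hall x hx; exact hall x (List.mem_cons_of_mem _ hx)
    · rw [dboLoop, if_pos (Bool.eq_false_iff.mpr h)]
      exact ⟨fun hf => absurd hf (by simp), fun hall => absurd (hmem.mpr (hall c (by simp))) h⟩

-- A's `differByOne(w1, w2)` is exactly B's `set(w1) <= set(w2)`
lemma differByOne_eq (w1 w2 : String) :
    differByOne w1 w2
      = PySem.Set.issubset (PySem.Set.ofList w1.toList) (PySem.Set.ofList w2.toList) := by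
  apply Bool.coe_iff_coe.mp
  rw [differByOne, dboLoop_iff, PySem.Set.issubset_iff]
  constructor
  · intro h x hx
    exact (PySem.Set.mem_ofList _ _).mpr (h x ((PySem.Set.mem_ofList _ _).mp hx))
  · intro h c hc
    exact (PySem.Set.mem_ofList _ _).mp (h c ((PySem.Set.mem_ofList _ _).mpr hc))

lemma getD_set_ne (xs : List Int) (i j : Nat) (v : Int) (h : j ≠ i) :
    (xs.set i v).getD j 0 = xs.getD j 0 := by
  simp [List.getD, List.getElem?_set_ne (by omega : i ≠ j)]

lemma getD_set_self (xs : List Int) (i : Nat) (v : Int) (h : i < xs.length) :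
    (xs.set i v).getD i 0 = v := by
  simp [List.getD, h]

-- A's inner loop only writes position i, reading positions j < i: it is a scalar fold
lemma foldl_set_scalar (c : Nat → Bool) (i : Nat) (l : List Nat) :
    ∀ (sol : List Int), (∀ j ∈ l, j < i) → i < sol.length →
    l.foldl (fun s j => if c j then s.set i (max (s.getD j 0 + 1) (s.getD i 0)) else s) sol
    = sol.set i (l.foldl (fun a j => if c j then max (sol.getD j 0 + 1) a else a) (sol.getD i 0)) := by
  induction l with
  | nil =>
    intro sol _ hi
    rw [List.foldl_nil, List.foldl_nil, List.getD_eq_getElem sol 0 hi, List.set_getElem_self]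
  | cons j l ih =>
    intro sol hl hi
    simp only [List.foldl_cons]
    by_cases hc : c j
    · have hji : j ≠ i := by have := hl j (by simp); omega
      rw [if_pos hc, if_pos hc]
      have hlen : i < (sol.set i (max (sol.getD j 0 + 1) (sol.getD i 0))).length := by
        simpa using hi
      rw [ih _ (fun j' hj' => hl j' (by simp [hj'])) hlen]
      rw [List.set_set]
      congr 1
      rw [getD_set_self _ _ _ hi]
      apply PySem.List.foldl_congr_mem
      intro a j' hj'
      have : j' ≠ i := by have := hl j' (by simp [hj']); omega
      rw [getD_set_ne _ _ _ _ this]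
    · rw [if_neg hc, if_neg hc]
      exact ih _ (fun j' hj' => hl j' (by simp [hj'])) hi

lemma innerA_set (ws : List String) (sol : List Int) (i : Nat) (hi : i < sol.length) :
    innerA ws sol i
      = sol.set i ((List.range i).foldl
          (fun a j => if condA ws i j then max (sol.getD j 0 + 1) a else a) (sol.getD i 0)) := by
  rw [innerA]
  exact foldl_set_scalar (condA ws i) i (List.range i) sol
    (fun j hj => List.mem_range.mp hj) hi

lemma le_foldl_if_max (c : Nat → Bool) (g : Nat → Int) (l : List Nat) :
    ∀ a : Int, a ≤ l.foldl (fun a j => if c j then max (g j + 1) a else a) a := by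
  induction l with
  | nil => intro a; simp
  | cons j l ih =>
    intro a
    refine le_trans ?_ (ih _)
    dsimp only [List.foldl_cons]
    split_ifs
    · exact le_max_right _ _
    · rfl

lemma take_succ_set (xs : List Int) (k : Nat) (v : Int) (h : k < xs.length) :
    (xs.set k v).take (k + 1) = xs.take k ++ [v] := by
  apply List.ext_getElem
  · simp; omega
  · intro i h1 h2
    simp only [List.getElem_take, List.getElem_set]
    by_cases hik : i = k
    · subst hik
      rw [List.getElem_append_right (by simp [List.length_take])]
      simp [List.length_take, Nat.min_eq_left (le_of_lt h)]
    · have hi : i < k := by simp [List.length_take] at h2; omega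
      rw [List.getElem_append_left (by simp [List.length_take]; omega)]
      rw [List.getElem_take, if_neg (by omega)]

-- the combined loop invariant, by induction over the k-th processed word
lemma invariant (ws : List String) (k : Nat) (hk : k ≤ ws.length) :
    (solA ws k).length = ws.length
    ∧ (∀ j, k ≤ j → j < ws.length → (solA ws k).getD j 0 = 1)
    ∧ (∀ j, j < k → 1 ≤ (solA ws k).getD j 0)
    ∧ (∀ L : Int, (stB ws k).1.getD L []
        = ((List.range k).filter (fun j => PySem.Str.len (ws.getD j "") == L)).map
            (fun j => (PySem.Set.ofList (ws.getD j "").toList, (solA ws k).getD j 0)))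
    ∧ (stB ws k).2 = ((solA ws k).take k).foldl (fun b d => max b d) 0 := by
  induction k with
  | zero =>
    refine ⟨by simp [solA], ?_, by omega, ?_, by simp [stB]⟩
    · intro j _ hj
      simp [solA, List.getD, hj]
    · intro L
      simp [stB]
  | succ k ih =>
    have hk' : k < ws.length := by omega
    obtain ⟨ih1, ih2, ih3, ih4, ih5⟩ := ih (by omega)
    set sol := solA ws k with hsol
    have hw : ws.getD k "" = ws[k] := by rw [List.getD_eq_getElem _ _ hk']
    set w := ws[k] with hwdef
    set dpA := (List.range k).foldl
        (fun a j => if condA ws k j then max (sol.getD j 0 + 1) a else a) (1 : Int) with hdpA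
    have hsolA : solA ws (k + 1) = sol.set k dpA := by
      rw [solA, List.range_succ, List.foldl_append, List.foldl_cons, List.foldl_nil]
      rw [← solA, ← hsol, innerA_set ws sol k (by omega)]
      rw [ih2 k (le_refl k) hk']
    have hstB : stB ws (k + 1) = stepB (stB ws k) w := by
      rw [stB, List.take_add_one, List.getElem?_eq_getElem hk']
      simp only [Option.toList_some, List.foldl_append, List.foldl_cons, List.foldl_nil]
      rfl
    have hdp : ((stB ws k).1.getD (PySem.Str.len w - 1) []).foldl
        (fun dp sd => if PySem.Set.issubset sd.1 (PySem.Set.ofList w.toList) && dp < sd.2 + 1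
          then sd.2 + 1 else dp) 1 = dpA := by
      rw [ih4 (PySem.Str.len w - 1), List.foldl_map, List.foldl_filter]
      apply PySem.List.foldl_congr_mem
      intro a j hj
      have hjk : j < k := List.mem_range.mp hj
      simp only [condA, hw, differByOne_eq]
      have hcond : (PySem.Str.len w - PySem.Str.len (ws.getD j "") == 1)
          = (PySem.Str.len (ws.getD j "") == PySem.Str.len w - 1) := by
        apply Bool.coe_iff_coe.mp
        simp only [beq_iff_eq]
        omega
      rw [hcond]
      by_cases h1 : (PySem.Str.len (ws.getD j "") == PySem.Str.len w - 1) = true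
      · rw [h1]
        simp only [if_true]
        by_cases hsub : PySem.Set.issubset (PySem.Set.ofList (ws.getD j "").toList)
            (PySem.Set.ofList w.toList) = true
        · rw [hsub]
          simp only [Bool.true_and, decide_eq_true_eq]
          split_ifs with h2
          · exact (max_eq_left (by omega)).symm
          · exact (max_eq_right (by omega)).symm
        · rw [Bool.eq_false_iff.mpr hsub]
          simp
      · rw [Bool.eq_false_iff.mpr h1]
        simp
    refine ⟨?_, ?_, ?_, ?_, ?_⟩
    · rw [hsolA]; simpa using ih1
    · intro j hj hj2
      rw [hsolA, getD_set_ne _ _ _ _ (by omega)]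
      exact ih2 j (by omega) hj2
    · intro j hj
      rcases Nat.lt_succ_iff_lt_or_eq.mp hj with h | rfl
      · rw [hsolA, getD_set_ne _ _ _ _ (by omega)]
        exact ih3 j h
      · rw [hsolA, getD_set_self _ _ _ (by omega), hdpA]
        exact le_foldl_if_max _ _ _ 1
    · intro L'
      rw [hstB]
      simp only [stepB]
      rw [hdp, PySem.Dict.getD_modify]
      rw [hsolA, List.range_succ, List.filter_append, List.map_append]
      have hmapeq : ((List.range k).filter (fun j => PySem.Str.len (ws.getD j "") == L')).map
            (fun j => (PySem.Set.ofList (ws.getD j "").toList, (sol.set k dpA).getD j 0))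
          = ((List.range k).filter (fun j => PySem.Str.len (ws.getD j "") == L')).map
            (fun j => (PySem.Set.ofList (ws.getD j "").toList, sol.getD j 0)) := by
        apply List.map_congr_left
        intro j hj
        have : j < k := List.mem_range.mp (List.mem_of_mem_filter hj)
        rw [getD_set_ne _ _ _ _ (by omega)]
      by_cases hLL : L' = PySem.Str.len w
      · subst hLL
        rw [if_pos rfl, ih4, hmapeq]
        have hfk : [k].filter (fun j => PySem.Str.len (ws.getD j "") == PySem.Str.len w) = [k] := by
          rw [List.filter_cons, hw]
          simp
        rw [hfk]
        simp only [List.map_cons, List.map_nil, hw]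
        rw [getD_set_self _ _ _ (by omega)]
      · rw [if_neg hLL, ih4 L', hmapeq]
        have hfk : [k].filter (fun j => PySem.Str.len (ws.getD j "") == L') = [] := by
          rw [List.filter_cons, hw]
          simp only [beq_iff_eq, List.filter_nil]
          rw [if_neg (by exact fun h => hLL h.symm)]
        rw [hfk]
        simp
    · rw [hstB]
      simp only [stepB]
      rw [hdp, ih5, hsolA, take_succ_set _ _ _ (by omega), List.foldl_append,
        List.foldl_cons, List.foldl_nil]
      by_cases h : dpA ≤ (sol.take k).foldl (fun b d => max b d) 0
      · rw [if_neg (by omega), max_eq_left h]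
      · rw [if_pos (by omega), max_eq_right (by omega)]

-- port A computed on Nat indices
lemma solution_eq_solA (words : List String) :
    solution words
      = (PySem.List.max? (solA (PySem.List.sorted words (fun s => PySem.Str.len s) false)
          ((PySem.List.sorted words (fun s => PySem.Str.len s) false).length)) (fun x => x)).getD 0 := by
  rw [solution, solA]
  have hlen : words.length = (PySem.List.sorted words (fun s => PySem.Str.len s) false).length :=
    (PySem.List.length_sorted _ _ _).symm
  simp only [PySem.List.len_eq, PySem.List.pyRange_zero_nat, List.foldl_map,
    PySem.List.pyGetD_natCast, PySem.List.pySetD_natCast, hlen]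
  rfl

lemma solution_alt_eq_stB (words : List String) :
    solution_alt words
      = (stB (PySem.List.sorted words (fun s => PySem.Str.len s) false)
          ((PySem.List.sorted words (fun s => PySem.Str.len s) false).length)).2 := by
  rw [solution_alt, stB, List.take_length]
  rfl

-- ===== VERDICT (by name: the statement is the Claim_ definition above) =====
theorem solution_spec : Claim_equal_solution := by
  intro words _ hpre
  unfold Spec_solution
  rw [solution_eq_solA, solution_alt_eq_stB]
  set ws := PySem.List.sorted words (fun s => PySem.Str.len s) false with hws
  have hne : ws ≠ [] := by
    rw [hws, Ne, PySem.List.sorted_eq_nil_iff]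
    exact hpre
  obtain ⟨inv1, -, inv3, -, inv5⟩ := invariant ws ws.length (le_refl _)
  rw [inv5, List.take_of_length_le (le_of_eq inv1)]
  rcases hsol : solA ws ws.length with - | ⟨s0, t⟩
  · exfalso
    rw [hsol] at inv1
    exact hne (List.length_eq_zero_iff.mp inv1.symm)
  · have hs0 : 1 ≤ s0 := by
      have h0 : 0 < ws.length := List.length_pos_of_ne_nil hne
      have := inv3 0 h0
      rwa [hsol, List.getD_cons_zero] at this
    rw [PySem.List.max?_id_cons, Option.getD_some, List.foldl_cons,
      max_eq_right (by omega : (0:Int) ≤ s0)]
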